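-- pv_equiv track=rewrite | github.com/songg10/Google-Foobar | Level 2/Problem 1/bunny_prisoner_locating.py | solution
-- ===== SOURCE A (Python) =====
-- def solution(x, y):
--     x_1 = y_1 = id = 1
--     while x_1 < x or y_1 < y:
--         y_1 = x_1
--         x_1 = 1
--         y_1 += 1
--         id += 1
--
--         while y_1 != 1:
--             if x_1 == x and y_1 == y:
--                 break
--             y_1 -= 1
--             x_1 += 1
--             id += 1
--
--     return id
-- ===== SOURCE B (Python) =====
-- def solution(x, y):
--     # Closed form: id at (x, y) = triangular number of the diagonal below, plus x.
--     return (x + y - 2) * (x + y - 1) // 2 + x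
-- ===== Notes on version B (the rewrite author's own statement) =====
-- stated objective: faster
-- what changed: Replaces A's diagonal-by-diagonal walk (two nested while loops incrementing a counter) with the closed-form triangular-number formula (x+y-2)(x+y-1)//2 + x.
-- outside the precondition, e.g. on solution(3, 0): A returns 6, B returns 4; on solution(-1, -1): A returns 1, B returns 5; on solution(0, -1): A returns 1, B returns 3
import Mathlib
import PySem

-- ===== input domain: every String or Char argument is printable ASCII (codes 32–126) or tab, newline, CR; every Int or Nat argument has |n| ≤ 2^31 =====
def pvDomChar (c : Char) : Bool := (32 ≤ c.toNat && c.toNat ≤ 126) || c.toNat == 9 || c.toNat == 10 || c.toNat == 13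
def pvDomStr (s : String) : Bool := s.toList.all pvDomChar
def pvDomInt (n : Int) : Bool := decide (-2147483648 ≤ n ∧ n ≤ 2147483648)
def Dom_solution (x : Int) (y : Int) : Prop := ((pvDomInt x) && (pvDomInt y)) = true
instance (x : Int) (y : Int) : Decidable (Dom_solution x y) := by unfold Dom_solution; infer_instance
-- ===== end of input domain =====

-- B replaces A's quadratic diagonal walk with the O(1) closed-form triangular-number formula (x+y-2)(x+y-1)//2 + x.


-- ===== PORT A =====
-- inner while loop: `while y_1 != 1: if x_1 == x and y_1 == y: break; y_1 -= 1; x_1 += 1; id += 1`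
-- fuel is only a totality guard; it never runs out on the fuel supplied by the callers below (inside Pre_).
def solInner (fuel : Nat) (x y x1 y1 id : Int) : Int × Int × Int :=
  match fuel with
  | 0 => (x1, y1, id)
  | f + 1 =>
    if y1 ≠ 1 then
      if x1 = x ∧ y1 = y then (x1, y1, id)
      else solInner f x y (x1 + 1) (y1 - 1) (id + 1)
    else (x1, y1, id)

-- outer while loop: `while x_1 < x or y_1 < y: y_1 = x_1; x_1 = 1; y_1 += 1; id += 1; <inner>`
def solOuter (fuel : Nat) (x y x1 y1 id : Int) : Int :=
  match fuel with
  | 0 => id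
  | f + 1 =>
    if x1 < x ∨ y1 < y then
      let y1' := x1 + 1
      let x1' := (1 : Int)
      let id' := id + 1
      let r := solInner y1'.toNat x y x1' y1' id'
      solOuter f x y r.1 r.2.1 r.2.2
    else id

def solution (x : Int) (y : Int) : Int :=
  solOuter ((x + y).toNat + 2) x y 1 1 1

-- ===== PORT B =====
def solution_alt (x : Int) (y : Int) : Int :=
  PySem.Int.floordiv ((x + y - 2) * (x + y - 1)) 2 + x

-- ===== PRECONDITION & SPEC =====
-- Pre_ restricts to the natural domain of grid coordinates, x ≥ 1 and y ≥ 1.  Outside it A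
-- either diverges (when x is non-positive and y is at least 2) or, for non-positive y, returns
-- the id of the cell with the same x on the bottom row regardless of y — an artefact of its
-- walk stopping at the end of a diagonal — which B's closed form does not reproduce.
def Pre_solution (x : Int) (y : Int) : Prop := 1 ≤ x ∧ 1 ≤ y
instance (x : Int) (y : Int) : Decidable (Pre_solution x y) := by unfold Pre_solution; infer_instance
def pvWitness_solution : Int × Int := (3, 2)
def Spec_solution (x : Int) (y : Int) (out : Int) : Prop := out = solution_alt x y
instance (x : Int) (y : Int) (out : Int) : Decidable (Spec_solution x y out) := by unfold Spec_solution; infer_instance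

-- ===== CLAIM (what is proved, stated in full; the proofs are below) =====
def Claim_equal_solution : Prop := ∀ (x : Int) (y : Int), Dom_solution x y → Pre_solution x y → Spec_solution x y (solution x y)

-- ===== LEMMAS AND PROOFS =====

-- exact halving through Python floor division
theorem half_exact (a m : Int) (h : a = 2 * m) : PySem.Int.floordiv a 2 = m := by
  rw [PySem.Int.floordiv_eq_ediv_of_pos (by norm_num)]
  omega

-- the inner loop reaches the target when it lies on the current diagonal ahead of the cursor
theorem solInner_hit (fuel : Nat) (x y x1 y1 id : Int)
    (hy : 1 ≤ y) (hx : x1 ≤ x) (hd : y1 = y + (x - x1)) (hf : (x - x1).toNat ≤ fuel) :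
    solInner fuel x y x1 y1 id = (x, y, id + (x - x1)) := by
  induction fuel generalizing x1 y1 id with
  | zero =>
    have hx1 : x1 = x := by omega
    subst hx1
    have hy1 : y1 = y := by omega
    subst hy1
    simp [solInner]
  | succ f ih =>
    rcases lt_or_eq_of_le hx with hlt | heq
    · have hy1 : y1 ≠ 1 := by omega
      have hne : ¬ (x1 = x ∧ y1 = y) := by omega
      rw [solInner, if_pos hy1, if_neg hne, ih (x1 + 1) (y1 - 1) (id + 1) (by omega) (by omega) (by omega)]
      have : id + 1 + (x - (x1 + 1)) = id + (x - x1) := by ring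
      rw [this]
    · subst heq
      have hy1 : y1 = y := by omega
      subst hy1
      by_cases h1 : y1 = 1
      · simp [solInner, h1]
      · simp [solInner, h1]
      
-- the inner loop runs off the end of a diagonal that misses the target
theorem solInner_miss (fuel : Nat) (x y x1 y1 id : Int)
    (hy1 : 1 ≤ y1) (hne : x1 + y1 ≠ x + y) (hf : (y1 - 1).toNat ≤ fuel) :
    solInner fuel x y x1 y1 id = (x1 + y1 - 1, 1, id + (y1 - 1)) := by
  induction fuel generalizing x1 y1 id with
  | zero =>
    have h1 : y1 = 1 := by omega
    subst h1
    simp [solInner]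
  | succ f ih =>
    by_cases h1 : y1 = 1
    · subst h1; simp [solInner]
    · have hnh : ¬ (x1 = x ∧ y1 = y) := by
        rintro ⟨rfl, rfl⟩; omega
      rw [solInner, if_pos h1, if_neg hnh, ih (x1 + 1) (y1 - 1) (id + 1) (by omega) (by omega) (by omega)]
      have e1 : x1 + 1 + (y1 - 1) - 1 = x1 + y1 - 1 := by ring
      have e2 : id + 1 + (y1 - 1 - 1) = id + (y1 - 1) := by ring
      rw [e1, e2]

-- outer-loop invariant: cursor at the end (c,1) of a completed diagonal, id the c-th triangular number
theorem solOuter_inv (fuel : Nat) (x y c id : Int)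
    (hx : 1 ≤ x) (hy : 1 ≤ y) (hc : 1 ≤ c) (hid : 2 * id = c * (c + 1))
    (hinv : (y = 1 ∧ c = x) ∨ c + 2 ≤ x + y) (hf : (x + y - c).toNat ≤ fuel) :
    solOuter fuel x y c 1 id = PySem.Int.floordiv ((x + y - 2) * (x + y - 1)) 2 + x := by
  induction fuel generalizing c id with
  | zero =>
    exfalso; omega
  | succ f ih =>
    rcases hinv with ⟨hy1, hcx⟩ | hstep
    · subst hy1; subst hcx
      have hcond : ¬ (c < c ∨ (1 : Int) < 1) := by omega
      rw [solOuter, if_neg hcond]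
      have := half_exact ((c + 1 - 2) * (c + 1 - 1)) (id - c) (by nlinarith)
      rw [this]; ring
    · have hcond : c < x ∨ (1 : Int) < y := by omega
      rw [solOuter, if_pos hcond]
      by_cases hdiag : c + 2 = x + y
      · -- the target lies on the new diagonal: the inner loop stops exactly at (x,y)
        have hin := solInner_hit (c + 1).toNat x y 1 (c + 1) (id + 1) hy (by omega) (by omega) (by omega)
        simp only [hin]
        have hf1 : 1 ≤ f := by omega
        obtain ⟨f', rfl⟩ : ∃ f', f = f' + 1 := ⟨f - 1, by omega⟩
        have hcond2 : ¬ (x < x ∨ y < y) := by omega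
        rw [solOuter, if_neg hcond2]
        have hc' : c = x + y - 2 := by omega
        have := half_exact ((x + y - 2) * (x + y - 1)) (id + 1 + (x - 1) - x) (by nlinarith)
        rw [this]; ring
      · -- the new diagonal misses the target: it ends at (c+1, 1)
        have hin := solInner_miss (c + 1).toNat x y 1 (c + 1) (id + 1) (by omega) (by omega) (by omega)
        simp only [hin]
        have h1 : (1 : Int) + (c + 1) - 1 = c + 1 := by ring
        have h2 : id + 1 + (c + 1 - 1) = id + c + 1 := by ring
        rw [h1, h2]
        exact ih (c + 1) (id + c + 1) (by omega) (by nlinarith) (by omega) (by omega)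

-- ===== VERDICT (by name: the statement is the Claim_ definition above) =====
theorem solution_spec : Claim_equal_solution := by
  intro x y _ hpre
  obtain ⟨hx, hy⟩ := hpre
  unfold Spec_solution solution solution_alt
  exact solOuter_inv ((x + y).toNat + 2) x y 1 1 hx hy (by norm_num) (by norm_num)
    (by omega) (by omega)
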